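-- pv_equiv track=rewrite | github.com/juliefolkerts/pp1 | 04-Subroutines/afterclass44.py | f
-- ===== SOURCE A (Python) =====
-- def f(password):
--     password = password.lower()
--     lengt_password = int(len(password))
--     for i in password:
--         frequency = password.count(i)
--         if frequency > 1:
--             lengt_password = (lengt_password - frequency + 1)
--         else:
--             lengt_password = lengt_password
--     if lengt_password >= 6:
--         return True
--     else:
--         return False
-- ===== SOURCE B (Python) =====
-- def f(password):
--     password = password.lower()
--     freq = {}
--     for c in password:
--         freq[c] = freq.get(c, 0) + 1
--     score = len(password)
--     for n in freq.values():
--         if n > 1: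
--             score -= n * (n - 1)
--     return score >= 6
-- ===== Notes on version B (the rewrite author's own statement) =====
-- stated objective: faster
-- what changed: Instead of re-scanning the whole string with count() for every character, B builds a frequency dictionary in one pass and subtracts f*(f-1) once per distinct repeated character (per-occurrence subtraction of f-1 grouped in closed form).
import Mathlib
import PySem

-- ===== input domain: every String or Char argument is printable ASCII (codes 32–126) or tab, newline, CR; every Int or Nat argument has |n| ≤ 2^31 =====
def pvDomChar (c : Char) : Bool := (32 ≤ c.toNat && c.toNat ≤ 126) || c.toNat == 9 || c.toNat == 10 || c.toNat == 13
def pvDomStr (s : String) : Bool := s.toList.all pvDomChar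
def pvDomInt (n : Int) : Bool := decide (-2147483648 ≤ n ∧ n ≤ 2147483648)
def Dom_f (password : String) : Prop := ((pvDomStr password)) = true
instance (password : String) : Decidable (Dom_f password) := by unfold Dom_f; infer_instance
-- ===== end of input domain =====

-- B replaces A's quadratic per-character count() rescans with one frequency dict built in a
-- single pass, subtracting f*(f-1) once per distinct repeated character (objective: faster).

-- ===== PORT A =====
def f (password : String) : Bool :=
  let p := (PySem.Str.lower password).toList
  let lengt0 : Int := (p.length : Int)
  let lengt := p.foldl (fun acc i =>
    let frequency : Int := (p.count i : Int)
    if frequency > 1 then acc - frequency + 1 else acc) lengt0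
  decide (lengt ≥ 6)

-- ===== PORT B =====
def f_alt (password : String) : Bool :=
  let p := (PySem.Str.lower password).toList
  let freq := p.foldl (fun d c => d.insert c (d.getD c 0 + 1))
    (PySem.Dict.empty : PySem.Dict Char Int)
  let score := freq.values.foldl (fun s n => if n > 1 then s - n * (n - 1) else s)
    (p.length : Int)
  decide (score ≥ 6)

-- ===== PRECONDITION & SPEC =====
def Spec_f (password : String) (out : Bool) : Prop := out = f_alt password
instance (password : String) (out : Bool) : Decidable (Spec_f password out) := by unfold Spec_f; infer_instance

-- ===== CLAIM (what is proved, stated in full; the proofs are below) =====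
def Claim_equal_f : Prop := ∀ (password : String), Dom_f password → Spec_f password (f password)

-- ===== LEMMAS AND PROOFS =====

-- sum of an ite that fires at exactly one element of a Nodup list
theorem pv_sum_ite_single (S : List Char) (hnd : S.Nodup) (x : Char) (hx : x ∈ S)
    (v : Char → Int) :
    (S.map (fun k => if k = x then v k else 0)).sum = v x := by
  induction S with
  | nil => cases hx
  | cons b t ih =>
    simp only [List.map_cons, List.sum_cons]
    have hnd' := List.nodup_cons.mp hnd
    rcases List.mem_cons.mp hx with h | h
    · subst h
      have hz : ∀ k ∈ t, (if k = x then v k else 0) = 0 := by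
        intro k hk
        have : k ≠ x := fun e => hnd'.1 (e ▸ hk)
        simp [this]
      rw [if_pos rfl, List.map_congr_left hz]
      simp
    · have hbx : b ≠ x := fun e => hnd'.1 (e ▸ h)
      rw [if_neg hbx, ih hnd'.2 h]
      ring

-- grouping a sum over occurrences into a sum over distinct elements weighted by count
theorem pv_sum_group (p : List Char) (g : Char → Int) :
    (p.map g).sum
      = ((PySem.Set.ofList p).map (fun k => (p.count k : Int) * g k)).sum := by
  induction p using List.reverseRecOn with
  | nil => simp [PySem.Set.ofList_nil]
  | append_singleton t x ih =>
    have hcnt : ∀ k : Char, ((t ++ [x]).count k : Int)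
        = (t.count k : Int) + (if k = x then 1 else 0) := by
      intro k
      by_cases h : k = x
      · simp [h, List.count_append]
      · have : List.count k [x] = 0 := by simp [List.count_eq_zero, h]
        simp [List.count_append, this, h]
    rw [PySem.Set.ofList_append_singleton, List.map_append, List.sum_append, List.map_singleton,
        List.sum_singleton, ih]
    by_cases hx : x ∈ PySem.Set.ofList t
    · rw [PySem.Set.add_of_mem hx]
      have hsplit : ∀ k ∈ PySem.Set.ofList t,
          (((t ++ [x]).count k : Int)) * g k
            = (t.count k : Int) * g k + (if k = x then g k else 0) := by
        intro k _
        rw [hcnt k]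
        by_cases h : k = x
        · simp [h]; ring
        · simp [h]
      rw [List.map_congr_left hsplit, PySem.List.sum_map_add_int,
          pv_sum_ite_single (PySem.Set.ofList t) (PySem.Set.nodup_ofList t) x hx g]
    · rw [PySem.Set.add_of_not_mem hx, List.map_append, List.sum_append, List.map_singleton,
          List.sum_singleton]
      have hxt : x ∉ t := fun h => hx ((PySem.Set.mem_ofList t x).mpr h)
      have h1 : ∀ k ∈ PySem.Set.ofList t,
          (((t ++ [x]).count k : Int)) * g k = (t.count k : Int) * g k := by
        intro k hk
        have : k ≠ x := fun e => hx (e ▸ hk)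
        rw [hcnt k, if_neg this]; ring
      have h2 : ((t ++ [x]).count x : Int) * g x = g x := by
        rw [hcnt x, if_pos rfl, List.count_eq_zero_of_not_mem hxt]
        push_cast; ring
      rw [List.map_congr_left h1, h2]

-- A's loop computes n + Σ_{c∈p} (1 - count c)
theorem pv_a_fold (p : List Char) :
    p.foldl (fun acc i =>
        let frequency : Int := (p.count i : Int)
        if frequency > 1 then acc - frequency + 1 else acc) ((p.length : Int))
      = (p.length : Int) + (p.map (fun c => 1 - (p.count c : Int))).sum := by
  have heq : p.foldl (fun acc i =>
        let frequency : Int := (p.count i : Int)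
        if frequency > 1 then acc - frequency + 1 else acc) ((p.length : Int))
      = p.foldl (fun acc c => acc + (1 - (p.count c : Int))) ((p.length : Int)) := by
    apply PySem.List.foldl_congr_mem
    intro acc c hc
    have h1 : 1 ≤ p.count c := List.count_pos_iff.mpr hc
    show (if ((p.count c : Int)) > 1 then acc - (p.count c : Int) + 1 else acc) = _
    by_cases h : ((p.count c : Int)) > 1
    · rw [if_pos h]; ring
    · rw [if_neg h]
      have : (p.count c : Int) = 1 := by omega
      rw [this]; ring
  rw [heq]
  exact PySem.List.foldl_add _ _ _

-- B's loop computes n + Σ_{k distinct} -(count k * (count k - 1))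
theorem pv_b_fold (p : List Char) :
    (p.foldl (fun d c => d.insert c (d.getD c 0 + 1))
        (PySem.Dict.empty : PySem.Dict Char Int)).values.foldl
      (fun s n => if n > 1 then s - n * (n - 1) else s) ((p.length : Int))
      = (p.length : Int)
        + ((PySem.Set.ofList p).map
            (fun k => -((p.count k : Int) * ((p.count k : Int) - 1)))).sum := by
  rw [PySem.Dict.foldl_insert_getD_add_one_eq_counter]
  have hv : (PySem.Dict.counter p).values
      = (PySem.Set.ofList p).map (fun k => (p.count k : Int)) := by
    simp only [PySem.Dict.values, PySem.Dict.items_counter, List.map_map]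
    rfl
  rw [hv, List.foldl_map]
  have heq : (PySem.Set.ofList p).foldl
        (fun s k => if ((p.count k : Int)) > 1
          then s - (p.count k : Int) * ((p.count k : Int) - 1) else s) ((p.length : Int))
      = (PySem.Set.ofList p).foldl
        (fun s k => s + -((p.count k : Int) * ((p.count k : Int) - 1))) ((p.length : Int)) := by
    apply PySem.List.foldl_congr_mem
    intro s k hk
    have hk' : k ∈ p := (PySem.Set.mem_ofList p k).mp hk
    have h1 : 1 ≤ p.count k := List.count_pos_iff.mpr hk'
    by_cases h : ((p.count k : Int)) > 1
    · rw [if_pos h]; ring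
    · rw [if_neg h]
      have : (p.count k : Int) = 1 := by omega
      rw [this]; ring
  rw [heq]
  exact PySem.List.foldl_add _ _ _

-- ===== VERDICT (by name: the statement is the Claim_ definition above) =====
theorem f_spec : Claim_equal_f := by
  intro password _
  show f password = f_alt password
  unfold f f_alt
  simp only [pv_a_fold, pv_b_fold]
  rw [pv_sum_group ((PySem.Str.lower password).toList)
      (fun c => 1 - (((PySem.Str.lower password).toList).count c : Int))]
  have hmap :
      ((PySem.Set.ofList ((PySem.Str.lower password).toList)).map
          (fun k => (((PySem.Str.lower password).toList).count k : Int)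
            * (1 - (((PySem.Str.lower password).toList).count k : Int)))).sum
        = ((PySem.Set.ofList ((PySem.Str.lower password).toList)).map
            (fun k => -((((PySem.Str.lower password).toList).count k : Int)
              * ((((PySem.Str.lower password).toList).count k : Int) - 1)))).sum := by
    apply congrArg List.sum
    apply List.map_congr_left
    intro k _
    ring
  rw [hmap]
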